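-- pv_equiv track=rewrite | github.com/FilippoITS/Esercizi | Lezione7/lezione7Es.py | rimuovi_elementi
-- ===== SOURCE A (Python) =====
-- def rimuovi_elementi(lista: list[int], da_rimuovere: dict[int:int]) -> list[int]:
--     # cancella pass e scrivi il tuo codice
--     quale:int = 0
--     quanti:int = 0
--
--     for k,v in da_rimuovere.items():
--         quale += k
--         quanti += v
--
--     for i in lista:
--         if i == quale:
--             while quanti > 0:
--                 quanti-=1
--                 lista.remove(i)
--     return lista
-- ===== SOURCE B (Python) =====
-- def rimuovi_elementi(lista: list[int], da_rimuovere: dict) -> list[int]: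
--     quale = sum(da_rimuovere.keys())
--     quanti = sum(da_rimuovere.values())
--     out = []
--     for x in lista:
--         if x == quale and quanti > 0:
--             quanti -= 1
--         else:
--             out.append(x)
--     lista[:] = out
--     return lista
-- ===== Notes on version B (the rewrite author's own statement) =====
-- stated objective: simpler
-- what changed: A iterates the list while mutating it in place with repeated list.remove inside a nested while; B sums the dict's keys and values, then builds the result in one pass with a countdown counter (and writes it back with lista[:] = out, keeping the in-place mutation).
import Mathlib
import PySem

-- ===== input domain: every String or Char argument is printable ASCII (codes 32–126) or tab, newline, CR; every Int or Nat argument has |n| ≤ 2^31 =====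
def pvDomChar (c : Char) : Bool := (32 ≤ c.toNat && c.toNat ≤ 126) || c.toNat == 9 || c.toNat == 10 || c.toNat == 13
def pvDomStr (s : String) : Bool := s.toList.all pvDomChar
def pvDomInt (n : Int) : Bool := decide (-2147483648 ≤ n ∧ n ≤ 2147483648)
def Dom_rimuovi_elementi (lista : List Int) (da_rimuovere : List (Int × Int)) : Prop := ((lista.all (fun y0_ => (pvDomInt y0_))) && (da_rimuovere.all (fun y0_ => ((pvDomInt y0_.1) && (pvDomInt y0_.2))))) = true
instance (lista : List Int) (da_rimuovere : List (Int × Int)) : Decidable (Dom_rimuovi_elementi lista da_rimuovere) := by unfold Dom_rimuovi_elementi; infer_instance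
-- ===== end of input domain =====

-- B replaces A's mutate-while-iterating loop (repeated list.remove) by one pass with a
-- countdown counter; same return value, and Source B keeps the in-place mutation via lista[:] = out.

-- ===== PORT A =====
-- 'while quanti > 0: quanti -= 1; lista.remove(i)'.  On remove? = none Python raises
-- ValueError (excluded by Pre_); the port stops the loop there.
def pyRemoveWhile (lista : List Int) (x : Int) (quanti : Int) : List Int × Int :=
  if _h : quanti > 0 then
    match PySem.List.remove? lista x with
    | some l' => pyRemoveWhile l' x (quanti - 1)
    | none => (lista, quanti - 1)
  else (lista, quanti)
termination_by quanti.toNat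
decreasing_by omega


theorem remove?_some_elim (l l' : List Int) (x : Int)
    (hrm : PySem.List.remove? l x = some l') : x ∈ l ∧ l' = l.erase x := by
  have hx : x ∈ l := by
    by_contra hx
    rw [(PySem.List.remove?_eq_none_iff l x).mpr hx] at hrm
    simp at hrm
  rw [PySem.List.remove?_eq_some_erase l x hx] at hrm
  exact ⟨hx, (Option.some_inj.mp hrm).symm⟩

theorem pyRemoveWhile_length_le (lista : List Int) (x : Int) (quanti : Int) :
    (pyRemoveWhile lista x quanti).1.length ≤ lista.length := by
  fun_induction pyRemoveWhile lista x quanti with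
  | case1 l q hq l' hrm ih =>
      obtain ⟨hx, rfl⟩ := remove?_some_elim l l' x hrm
      have h1 : (l.erase x).length = l.length - 1 := List.length_erase_of_mem hx
      have h2 : 0 < l.length := List.length_pos_of_mem hx
      omega
  | case2 => simp
  | case3 => simp

-- 'for i in lista:' over a list mutated in the body = index-based iteration.
def pyForLoop (lista : List Int) (i : Nat) (quale quanti : Int) : List Int :=
  if h : i < lista.length then
    if lista[i] = quale then
      let r := pyRemoveWhile lista lista[i] quanti
      pyForLoop r.1 (i + 1) quale r.2
    else
      pyForLoop lista (i + 1) quale quanti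
  else lista
termination_by lista.length - i
decreasing_by
  · have := pyRemoveWhile_length_le lista lista[i] quanti; omega
  · omega

def rimuovi_elementi (lista : List Int) (da_rimuovere : List (Int × Int)) : List Int :=
  let items := (PySem.Dict.ofList da_rimuovere).items
  let qq := items.foldl (fun (a : Int × Int) kv => (a.1 + kv.1, a.2 + kv.2)) (0, 0)
  pyForLoop lista 0 qq.1 qq.2

-- ===== PORT B =====
def rimuovi_elementi_alt (lista : List Int) (da_rimuovere : List (Int × Int)) : List Int :=
  let d := PySem.Dict.ofList da_rimuovere
  let quale := d.keys.foldl (· + ·) 0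
  let quanti := d.values.foldl (· + ·) 0
  (lista.foldl
    (fun (acc : List Int × Int) x =>
      if x = quale ∧ acc.2 > 0 then (acc.1, acc.2 - 1) else (acc.1 ++ [x], acc.2))
    ([], quanti)).1

-- ===== PRECONDITION & SPEC =====
-- Pre_ excludes exactly the inputs on which A raises ValueError: the summed key occurs in
-- the list, but fewer times than the summed count.
def Pre_rimuovi_elementi (lista : List Int) (da_rimuovere : List (Int × Int)) : Prop :=
  let d := PySem.Dict.ofList da_rimuovere
  let quale := d.keys.foldl (· + ·) 0
  let quanti := d.values.foldl (· + ·) 0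
  quale ∈ lista → quanti ≤ (lista.count quale : Int)
instance (lista : List Int) (da_rimuovere : List (Int × Int)) : Decidable (Pre_rimuovi_elementi lista da_rimuovere) := by unfold Pre_rimuovi_elementi; infer_instance

def pvWitness_rimuovi_elementi : List Int × (List (Int × Int)) := ([1, 2, 1, 3], [(1, 2)])

def Spec_rimuovi_elementi (lista : List Int) (da_rimuovere : List (Int × Int)) (out : List Int) : Prop := out = rimuovi_elementi_alt lista da_rimuovere
instance (lista : List Int) (da_rimuovere : List (Int × Int)) (out : List Int) : Decidable (Spec_rimuovi_elementi lista da_rimuovere out) := by unfold Spec_rimuovi_elementi; infer_instance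

-- ===== CLAIM (what is proved, stated in full; the proofs are below) =====
def Claim_equal_rimuovi_elementi : Prop := ∀ (lista : List Int) (da_rimuovere : List (Int × Int)), Dom_rimuovi_elementi lista da_rimuovere → Pre_rimuovi_elementi lista da_rimuovere → Spec_rimuovi_elementi lista da_rimuovere (rimuovi_elementi lista da_rimuovere)

-- ===== LEMMAS AND PROOFS =====

-- 'remove the first n occurrences of x' — the common characterisation of both ports
def removeN (l : List Int) (x : Int) : Nat → List Int
  | 0 => l
  | n + 1 => removeN (l.erase x) x n

theorem removeN_of_not_mem (x : Int) (n : Nat) (l : List Int) (hx : x ∉ l) :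
    removeN l x n = l := by
  induction n with
  | zero => rfl
  | succ n ih => simp [removeN, List.erase_of_not_mem hx, ih]

theorem removeN_cons_of_ne (x y : Int) (n : Nat) (l : List Int) (hxy : y ≠ x) :
    removeN (y :: l) x n = y :: removeN l x n := by
  induction n generalizing l with
  | zero => rfl
  | succ n ih =>
      have : (y :: l).erase x = y :: l.erase x := by
        simp [hxy]
      simp [removeN, this, ih]

-- ---- A side ----

theorem pyRemoveWhile_fst (l : List Int) (x : Int) (q : Int) :
    (pyRemoveWhile l x q).1 = removeN l x q.toNat := by
  fun_induction pyRemoveWhile l x q with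
  | case1 l q hq l' hrm ih =>
      obtain ⟨hx, rfl⟩ := remove?_some_elim l l' x hrm
      have hn : q.toNat = (q - 1).toNat + 1 := by omega
      rw [ih, hn, removeN]
  | case2 l q hq hrm =>
      have hx : x ∉ l := (PySem.List.remove?_eq_none_iff l x).mp hrm
      rw [removeN_of_not_mem x q.toNat l hx]
  | case3 l q hq =>
      have : q.toNat = 0 := by omega
      simp [this, removeN]

theorem pyRemoveWhile_snd_of_count (l : List Int) (x : Int) (q : Int)
    (hq : 0 ≤ q) (hc : q ≤ (l.count x : Int)) : (pyRemoveWhile l x q).2 = 0 := by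
  fun_induction pyRemoveWhile l x q with
  | case1 l q hq' l' hrm ih =>
      obtain ⟨hx, rfl⟩ := remove?_some_elim l l' x hrm
      have hce : (l.erase x).count x = l.count x - 1 := by
        simp [List.count_erase_self]
      have hcl : 0 < l.count x := List.count_pos_iff.mpr hx
      exact ih (by omega) (by push_cast [hce]; omega)
  | case2 l q hq' hrm =>
      have hx : x ∉ l := (PySem.List.remove?_eq_none_iff l x).mp hrm
      have : l.count x = 0 := List.count_eq_zero.mpr hx
      omega
  | case3 l q hq' => omega

theorem pyForLoop_noop (l : List Int) (i : Nat) (x q : Int) (hq : q ≤ 0) :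
    pyForLoop l i x q = l := by
  fun_induction pyForLoop l i x q with
  | case1 l i q' h heq r ih =>
      have hr : pyRemoveWhile l l[i] q' = (l, q') := by
        rw [pyRemoveWhile]; simp [show ¬ q' > 0 by omega]
      simp only [r, hr] at ih ⊢
      exact ih hq
  | case2 l i q' h heq ih => exact ih hq
  | case3 => rfl

theorem pyForLoop_skip (l : List Int) (i : Nat) (x q : Int)
    (hnx : ∀ j, i ≤ j → (h : j < l.length) → l[j] ≠ x) :
    pyForLoop l i x q = l := by
  fun_induction pyForLoop l i x q with
  | case1 l i q' h heq r ih => exact absurd heq (hnx i le_rfl h)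
  | case2 l i q' h heq ih =>
      exact ih (fun j hj hjl => hnx j (by omega) hjl)
  | case3 => rfl

theorem pyForLoop_main (l : List Int) (i : Nat) (x q : Int)
    (hq : 0 < q) (hc : q ≤ ((l.drop i).count x : Int)) (hcl : q ≤ (l.count x : Int)) :
    pyForLoop l i x q = removeN l x q.toNat := by
  fun_induction pyForLoop l i x q with
  | case1 l i q' h heq r ih =>
      have h1 : r.1 = removeN l x q'.toNat := by
        rw [show r = pyRemoveWhile l l[i] q' from rfl, heq]
        exact pyRemoveWhile_fst l x q'
      have h2 : r.2 = 0 := by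
        rw [show r = pyRemoveWhile l l[i] q' from rfl, heq]
        exact pyRemoveWhile_snd_of_count l x q' (by omega) hcl
      rw [h2, pyForLoop_noop r.1 (i + 1) x 0 le_rfl, h1]
  | case2 l i q' h heq ih =>
      have hdrop : l.drop i = l[i] :: l.drop (i + 1) := by
        exact (List.getElem_cons_drop h).symm
      have : (l.drop (i + 1)).count x = (l.drop i).count x := by
        rw [hdrop, List.count_cons]
        simp [heq]
      exact ih hq (by rw [this]; exact hc) hcl
  | case3 l i q' h =>
      have : l.drop i = [] := List.drop_eq_nil_of_le (by omega)
      rw [this] at hc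
      simp at hc
      omega

-- ---- B side ----

def bSpec (x : Int) : List Int → Int → List Int
  | [], _ => []
  | y :: ys, q => if y = x ∧ q > 0 then bSpec x ys (q - 1) else y :: bSpec x ys q

theorem bFold_eq_bSpec (x : Int) (l : List Int) (acc : List Int) (q : Int) :
    (l.foldl
      (fun (a : List Int × Int) y =>
        if y = x ∧ a.2 > 0 then (a.1, a.2 - 1) else (a.1 ++ [y], a.2))
      (acc, q)).1 = acc ++ bSpec x l q := by
  induction l generalizing acc q with
  | nil => simp [bSpec]
  | cons y ys ih =>
      by_cases hy : y = x ∧ q > 0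
      · simp [bSpec, hy, ih]
      · simp only [List.foldl_cons, bSpec, if_neg hy, ih, List.append_assoc,
          List.singleton_append]

theorem bSpec_eq_removeN (x : Int) (l : List Int) (q : Int) :
    bSpec x l q = removeN l x q.toNat := by
  induction l generalizing q with
  | nil => simp [bSpec, removeN_of_not_mem]
  | cons y ys ih =>
      by_cases hy : y = x ∧ q > 0
      · obtain ⟨rfl, hq⟩ := hy
        have hn : q.toNat = (q - 1).toNat + 1 := by omega
        rw [bSpec, if_pos ⟨rfl, hq⟩, ih, hn, removeN, List.erase_cons_head]
      · rw [bSpec, if_neg hy, ih]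
        by_cases hyx : y = x
        · have hq : ¬ q > 0 := fun h => hy ⟨hyx, h⟩
          have : q.toNat = 0 := by omega
          simp [this, removeN]
        · exact (removeN_cons_of_ne x y q.toNat ys hyx).symm

-- ---- sums of keys/values: one pair-fold (A) vs two folds (B) ----

theorem pairFold_eq (items : List (Int × Int)) (a b : Int) :
    items.foldl (fun (p : Int × Int) kv => (p.1 + kv.1, p.2 + kv.2)) (a, b) =
      ((items.map Prod.fst).foldl (· + ·) a, (items.map Prod.snd).foldl (· + ·) b) := by
  induction items generalizing a b with
  | nil => rfl
  | cons kv rest ih => simp [ih]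

theorem sum_pairFold_keys (da : List (Int × Int)) :
    (PySem.Dict.ofList da).items.foldl
        (fun (p : Int × Int) kv => (p.1 + kv.1, p.2 + kv.2)) (0, 0) =
      ((PySem.Dict.ofList da).keys.foldl (· + ·) 0,
        (PySem.Dict.ofList da).values.foldl (· + ·) 0) := by
  rw [pairFold_eq]
  rfl

theorem a_eq (lista : List Int) (da_rimuovere : List (Int × Int)) :
    rimuovi_elementi lista da_rimuovere =
      pyForLoop lista 0 ((PySem.Dict.ofList da_rimuovere).keys.foldl (· + ·) 0)
        ((PySem.Dict.ofList da_rimuovere).values.foldl (· + ·) 0) := by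
  simp only [rimuovi_elementi, sum_pairFold_keys]

theorem alt_eq (lista : List Int) (da_rimuovere : List (Int × Int)) :
    rimuovi_elementi_alt lista da_rimuovere =
      removeN lista ((PySem.Dict.ofList da_rimuovere).keys.foldl (· + ·) 0)
        ((PySem.Dict.ofList da_rimuovere).values.foldl (· + ·) 0).toNat := by
  simp only [rimuovi_elementi_alt]
  rw [bFold_eq_bSpec ((PySem.Dict.ofList da_rimuovere).keys.foldl (· + ·) 0) lista []
      ((PySem.Dict.ofList da_rimuovere).values.foldl (· + ·) 0),
    List.nil_append, bSpec_eq_removeN]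

-- ===== VERDICT (by name: the statement is the Claim_ definition above) =====
theorem rimuovi_elementi_spec : Claim_equal_rimuovi_elementi := by
  intro lista da_rimuovere _hdom hpre
  simp only [Pre_rimuovi_elementi] at hpre
  unfold Spec_rimuovi_elementi
  rw [a_eq, alt_eq]
  set quale := (PySem.Dict.ofList da_rimuovere).keys.foldl (· + ·) 0 with hquale
  set quanti := (PySem.Dict.ofList da_rimuovere).values.foldl (· + ·) 0 with hquanti
  by_cases hq0 : quanti ≤ 0
  · rw [pyForLoop_noop lista 0 quale quanti hq0]
    have h0 : quanti.toNat = 0 := by omega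
    rw [h0, removeN]
  · have hq : 0 < quanti := by omega
    by_cases hx : quale ∈ lista
    · have hc := hpre hx
      exact pyForLoop_main lista 0 quale quanti hq (by simpa using hc) hc
    · rw [pyForLoop_skip lista 0 quale quanti
        (fun j _ hjl heq => hx (heq ▸ List.getElem_mem hjl))]
      exact (removeN_of_not_mem quale quanti.toNat lista hx).symm
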